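-- pv_equiv track=rewrite | github.com/laws-spatial/AoC23 | src/day1b.py | num_char
-- ===== SOURCE A (Python) =====
-- nums_spelled_out = {
--     "one": "one1one",
--     "two": "two2two",
--     "three": "three3three",
--     "four": "four4four",
--     "five": "five5five",
--     "six": "six6six",
--     "seven": "seven7seven",
--     "eight": "eight8eight",
--     "nine": "nine9nine",
-- }
--
-- def num_char(line: str):
--     """Return a list of all numeric characters in a string"""
--     num_chars_dict = {}
--
--     # check if any of the spelled out numbers are in the line
--     for key, value in nums_spelled_out.items():
--         # if line.find(key) != -1:
--         #     num_chars_dict[line.find(key)] = value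
--         line = line.replace(key, value)
--
--     # check if any of the numbers are in the line
--     for idx, char in enumerate(line):
--         if char.isnumeric():
--             num_chars_dict[idx] = char
--
--     # sort the dictionary by key
--     sorted_num_dict = dict(sorted(num_chars_dict.items()))
--
--     # return the values
--     num_chars_list = [value for value in sorted_num_dict.values()]
--
--     return num_chars_list
-- ===== SOURCE B (Python) =====
-- # Single left-to-right scan of the original line: at each index emit the digit
-- # character itself, or the digit of a spelled-out number word starting there
-- # (overlapping matches allowed) -- no replace passes, no dict, no sort.
-- word_digits = [
--     ("one", "1"), ("two", "2"), ("three", "3"),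
--     ("four", "4"), ("five", "5"), ("six", "6"),
--     ("seven", "7"), ("eight", "8"), ("nine", "9"),
-- ]
--
-- def num_char(line: str):
--     out = []
--     for i in range(len(line)):
--         if line[i].isnumeric():
--             out.append(line[i])
--         else:
--             for word, dig in word_digits:
--                 if line.startswith(word, i):
--                     out.append(dig)
--     return out
-- ===== Notes on version B (the rewrite author's own statement) =====
-- stated objective: simpler
-- what changed: B replaces A's nine string-replace passes plus enumerate/dict/sort/values pipeline by one left-to-right scan of the original line that emits a digit character directly, or the digit of a spelled-out word starting at that position (overlaps allowed).
import Mathlib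
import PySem

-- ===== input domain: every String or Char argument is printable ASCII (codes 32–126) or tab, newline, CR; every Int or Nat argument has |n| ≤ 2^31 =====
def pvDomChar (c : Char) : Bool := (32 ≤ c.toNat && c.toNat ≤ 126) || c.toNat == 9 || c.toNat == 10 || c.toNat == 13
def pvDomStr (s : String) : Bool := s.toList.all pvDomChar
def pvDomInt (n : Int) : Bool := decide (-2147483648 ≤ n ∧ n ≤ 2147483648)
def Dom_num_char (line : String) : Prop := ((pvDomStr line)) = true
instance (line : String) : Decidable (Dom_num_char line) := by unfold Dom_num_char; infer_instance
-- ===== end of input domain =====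

-- B replaces A's nine string-replace passes + enumerate/dict/sort pipeline by one direct
-- left-to-right scan of the original line; same return value, simpler structure (not faster).

-- ===== PORT A =====
-- A's module-level dict nums_spelled_out, as an association list in insertion order
def numsSpelledOut : List (String × String) :=
  [("one", "one1one"), ("two", "two2two"), ("three", "three3three"), ("four", "four4four"),
   ("five", "five5five"), ("six", "six6six"), ("seven", "seven7seven"), ("eight", "eight8eight"),
   ("nine", "nine9nine")]

-- Port of A.  `char.isnumeric()` is ported as PySem.Chars.isdigit (identical on the ASCII
-- input domain); iterating a Python str yields 1-character strings, ported as String.mk [c].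
def num_char (line : String) : List String :=
  let line1 := numsSpelledOut.foldl (fun l kv => PySem.Str.replace l kv.1 kv.2) line
  let d := (PySem.List.enumerate line1.toList).foldl
      (fun (d : PySem.Dict Int String) p =>
        if PySem.Chars.isdigit p.2 then d.insert p.1 (String.mk [p.2]) else d)
      PySem.Dict.empty
  let sortedItems := PySem.List.sorted2 d.items (fun p => p.1) (fun p => p.2) false
  (PySem.Dict.ofList sortedItems).values

-- ===== PORT B =====
-- B's module-level table word_digits (digit characters, as Chars; B's 1-char strings)
def wordDigits : List (List Char × Char) :=
  [("one".toList, '1'), ("two".toList, '2'), ("three".toList, '3'), ("four".toList, '4'),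
   ("five".toList, '5'), ("six".toList, '6'), ("seven".toList, '7'), ("eight".toList, '8'),
   ("nine".toList, '9')]

-- B's index loop `for i in range(len(line))` ported as the obvious recursion over suffixes;
-- `line.startswith(word, i)` is startswith on the current suffix.
def scanB (ws : List (List Char × Char)) : List Char → List Char
  | [] => []
  | c :: t =>
    (if PySem.Chars.isdigit c then [c]
     else ws.filterMap (fun p => if PySem.Chars.startswith (c :: t) p.1 then some p.2 else none))
    ++ scanB ws t

def num_char_alt (line : String) : List String :=
  (scanB wordDigits line.toList).map (fun c => String.mk [c])

-- ===== PRECONDITION & SPEC =====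
def Spec_num_char (line : String) (out : List String) : Prop := out = num_char_alt line
instance (line : String) (out : List String) : Decidable (Spec_num_char line out) := by unfold Spec_num_char; infer_instance

-- ===== CLAIM (what is proved, stated in full; the proofs are below) =====
def Claim_equal_num_char : Prop := ∀ (line : String), Dom_num_char line → Spec_num_char line (num_char line)

-- ===== LEMMAS AND PROOFS =====

-- Python str.replace(old, new) for nonempty old, on lists of characters:
-- replace the leftmost occurrence, continue after the inserted text.
def rep (w v : List Char) : List Char → List Char
  | [] => []
  | c :: t => if w <+: c :: t then v ++ rep w v (t.drop (w.length - 1)) else c :: rep w v t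
  termination_by s => s.length
  decreasing_by
    · simp only [List.length_drop, List.length_cons]; omega
    · simp

theorem go_eq_rep (old new : List Char) (hold : old ≠ []) :
    ∀ (fuel : ℕ) (l acc : List Char), l.length ≤ fuel →
      PySem.Chars.replace.go old new fuel l acc = acc.reverse ++ rep old new l := by
  intro fuel
  induction fuel with
  | zero =>
    intro l acc h
    have hl : l = [] := by
      cases l with
      | nil => rfl
      | cons c t => simp at h
    subst hl
    simp [PySem.Chars.replace.go, rep]
  | succ n ih =>
    intro l acc h
    cases l with
    | nil => simp [PySem.Chars.replace.go, rep]
    | cons c t =>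
      obtain ⟨m, hm⟩ : ∃ m, old.length = m + 1 := by
        cases old with
        | nil => exact absurd rfl hold
        | cons _ tw => exact ⟨tw.length, rfl⟩
      by_cases hp : old <+: c :: t
      · have hb : old.isPrefixOf (c :: t) = true := List.isPrefixOf_iff_prefix.mpr hp
        have hgo : PySem.Chars.replace.go old new (n+1) (c :: t) acc
            = PySem.Chars.replace.go old new n (List.drop old.length (c :: t)) (new.reverse ++ acc) := by
          simp [PySem.Chars.replace.go, hb]
        have h' : t.length ≤ n := by simp at h; omega
        rw [hgo, ih _ _ (by simp only [List.length_drop, List.length_cons]; omega)]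
        have hrep : rep old new (c :: t) = new ++ rep old new (t.drop (old.length - 1)) := by
          simp only [rep]; rw [if_pos hp]
        rw [hrep]
        have hdrop : List.drop old.length (c :: t) = t.drop (old.length - 1) := by
          rw [hm]; simp
        rw [hdrop]
        simp [List.append_assoc]
      · have hb : old.isPrefixOf (c :: t) = false := by
          rw [← Bool.not_eq_true, List.isPrefixOf_iff_prefix]; exact hp
        have hgo : PySem.Chars.replace.go old new (n+1) (c :: t) acc
            = PySem.Chars.replace.go old new n t (c :: acc) := by
          simp [PySem.Chars.replace.go, hb]
        rw [hgo, ih _ _ (by simp at h ⊢; omega)]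
        have hrep : rep old new (c :: t) = c :: rep old new t := by
          simp only [rep]; rw [if_neg hp]
        rw [hrep]
        simp

theorem replace_eq_rep (s old new : List Char) (h : old ≠ []) :
    PySem.Chars.replace s old new = rep old new s := by
  unfold PySem.Chars.replace
  rw [if_neg (by simp [List.isEmpty_iff, h])]
  simpa using go_eq_rep old new h s.length s [] le_rfl

-- the per-position emission of the scan
def emit (ws : List (List Char × Char)) (s : List Char) : List Char :=
  ws.filterMap (fun p => if p.1 <+: s then some p.2 else none)

theorem scanB_cons (ws : List (List Char × Char)) (c : Char) (t : List Char) :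
    scanB ws (c :: t)
      = (if PySem.Chars.isdigit c then [c] else emit ws (c :: t)) ++ scanB ws t := by
  simp only [scanB, emit, PySem.Chars.startswith, List.isPrefixOf_iff_prefix]

theorem emit_nil_words (s : List Char) : emit [] s = [] := rfl

theorem emit_cons (w : List Char) (d : Char) (ws : List (List Char × Char)) (s : List Char) :
    emit ((w, d) :: ws) s = (if w <+: s then [d] else []) ++ emit ws s := by
  by_cases h : w <+: s
  · simp [emit, List.filterMap_cons, h]
  · simp [emit, List.filterMap_cons, h]

theorem emit_empty {ws : List (List Char × Char)} {s : List Char}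
    (h : ∀ p ∈ ws, ¬ p.1 <+: s) : emit ws s = [] := by
  simp only [emit, List.filterMap_eq_nil_iff]
  intro p hp
  rw [if_neg (h p hp)]

theorem scanB_nil_filter : ∀ s : List Char, scanB [] s = s.filter PySem.Chars.isdigit := by
  intro s
  induction s with
  | nil => simp [scanB]
  | cons c t ih =>
    rw [scanB_cons, emit_nil_words, List.filter_cons, ih]
    by_cases hc : PySem.Chars.isdigit c = true <;> simp [hc]

-- prefix-of-append case split
theorem prefix_append_of_le {α : Type} {u a : List α} (z : List α) (h : u.length ≤ a.length) :
    u <+: a ++ z ↔ u <+: a := by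
  constructor
  · intro hu
    rcases List.prefix_or_prefix_of_prefix hu (List.prefix_append a z) with h1 | h1
    · exact h1
    · have heq : a = u := h1.sublist.eq_of_length (le_antisymm h1.length_le h)
      subst heq; exact List.prefix_refl _
  · intro hu; exact hu.trans (List.prefix_append a z)

theorem prefix_append_of_gt {α : Type} {u a : List α} (z : List α) (h : a.length < u.length) :
    u <+: a ++ z ↔ a <+: u ∧ u.drop a.length <+: z := by
  constructor
  · intro hu
    rcases List.prefix_or_prefix_of_prefix hu (List.prefix_append a z) with h1 | h1
    · exact absurd h1.length_le (by omega)
    · obtain ⟨r, rfl⟩ := h1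
      refine ⟨List.prefix_append a r, ?_⟩
      rw [List.drop_left]
      exact (List.prefix_append_right_inj a).mp hu
  · rintro ⟨h1, h2⟩
    obtain ⟨r, rfl⟩ := h1
    rw [List.drop_left] at h2
    exact (List.prefix_append_right_inj a).mpr h2

-- a digit-free string u that does not contain w is a prefix of the
-- replaced string iff it is a prefix of the original
theorem prefix_rep_iff (w : List Char) (d : Char) (hd : PySem.Chars.isdigit d = true) :
    ∀ (n : ℕ) (x u : List Char), x.length ≤ n →
      (∀ c ∈ u, PySem.Chars.isdigit c = false) → ¬ w <:+: u →
      (u <+: rep w (w ++ d :: w) x ↔ u <+: x) := by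
  intro n
  induction n with
  | zero =>
    intro x u hx _ _
    have hxe : x = [] := by
      cases x with
      | nil => rfl
      | cons c t => simp at hx
    subst hxe; simp [rep]
  | succ n ih =>
    intro x u hx hund hinf
    cases x with
    | nil => simp [rep]
    | cons c t =>
      by_cases hpre : w <+: c :: t
      · have hrep : rep w (w ++ d :: w) (c :: t)
            = w ++ (d :: (w ++ rep w (w ++ d :: w) (t.drop (w.length - 1)))) := by
          simp only [rep]; rw [if_pos hpre]; simp [List.append_assoc]
        rw [hrep]
        by_cases hul : u.length ≤ w.length
        · rw [prefix_append_of_le _ hul]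
          constructor
          · intro hu; exact hu.trans hpre
          · intro hu
            obtain ⟨r, hr⟩ := hpre
            rw [← hr] at hu
            exact (prefix_append_of_le r hul).mp hu
        · push_neg at hul
          constructor
          · intro hu
            obtain ⟨-, hdrop⟩ := (prefix_append_of_gt _ hul).mp hu
            cases hdd : u.drop w.length with
            | nil =>
              have := congrArg List.length hdd
              simp at this; omega
            | cons e r =>
              rw [hdd] at hdrop
              obtain ⟨hed, -⟩ := List.cons_prefix_cons.mp hdrop
              have hmem : e ∈ u := (List.drop_suffix w.length u).subset (hdd ▸ List.mem_cons_self)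
              rw [hed] at hmem
              rw [hund d hmem] at hd; exact absurd hd (by simp)
          · intro hu
            obtain ⟨r, hr⟩ := hpre
            rw [← hr] at hu
            obtain ⟨hwu, -⟩ := (prefix_append_of_gt _ hul).mp hu
            exact absurd hwu.isInfix hinf
      · have hrep : rep w (w ++ d :: w) (c :: t) = c :: rep w (w ++ d :: w) t := by
          simp only [rep]; rw [if_neg hpre]
        rw [hrep]
        cases u with
        | nil => simp
        | cons e u' =>
          rw [List.cons_prefix_cons, List.cons_prefix_cons]
          have h1 : u' <+: rep w (w ++ d :: w) t ↔ u' <+: t := by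
            apply ih t u' (by simp at hx; omega)
            · intro c' hc'; exact hund c' (List.mem_cons_of_mem e hc')
            · intro hw'
              exact hinf (hw'.trans (List.suffix_cons e u').isInfix)
          rw [h1]

-- the decidable hypothesis bundle of one replacement step
abbrev StepOk (w : List Char) (d : Char) (ws : List (List Char × Char)) : Prop :=
  w ≠ [] ∧ (∀ c ∈ w, PySem.Chars.isdigit c = false) ∧ PySem.Chars.isdigit d = true ∧
  (∀ a ∈ w.tails, a <+: w → a = [] ∨ a = w) ∧
  (∀ p ∈ ws, (∀ c ∈ p.1, PySem.Chars.isdigit c = false) ∧ ¬ w <:+: p.1 ∧ ¬ p.1 <:+: w)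

-- no word of ws can match at a position inside a suffix a of w followed by the digit d
theorem emit_mid_empty {w : List Char} {d : Char} {ws : List (List Char × Char)}
    (h : StepOk w d ws) {a : List Char} (ha : a <:+ w) (z : List Char) :
    emit ws (a ++ d :: z) = [] := by
  apply emit_empty
  intro p hp hpre
  by_cases hl : p.1.length ≤ a.length
  · have h1 : p.1 <+: a := (prefix_append_of_le _ hl).mp hpre
    exact (h.2.2.2.2 p hp).2.2 (h1.isInfix.trans ha.isInfix)
  · push_neg at hl
    obtain ⟨-, hdrop⟩ := (prefix_append_of_gt _ hl).mp hpre
    cases hdd : p.1.drop a.length with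
    | nil =>
      have := congrArg List.length hdd
      simp at this; omega
    | cons e r =>
      rw [hdd] at hdrop
      obtain ⟨hed, -⟩ := List.cons_prefix_cons.mp hdrop
      have hmem : e ∈ p.1 := (List.drop_suffix a.length p.1).subset (hdd ▸ List.mem_cons_self)
      rw [hed] at hmem
      have hdig := (h.2.2.2.2 p hp).1 d hmem
      rw [h.2.2.1] at hdig
      exact absurd hdig (by simp)

-- no word of ws can match at the start of w ++ z
theorem emit_w_empty {w : List Char} {d : Char} {ws : List (List Char × Char)}
    (h : StepOk w d ws) (z : List Char) : emit ws (w ++ z) = [] := by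
  apply emit_empty
  intro p hp hpre
  by_cases hl : p.1.length ≤ w.length
  · have h1 : p.1 <+: w := (prefix_append_of_le _ hl).mp hpre
    exact (h.2.2.2.2 p hp).2.2 h1.isInfix
  · push_neg at hl
    obtain ⟨hwp, -⟩ := (prefix_append_of_gt _ hl).mp hpre
    exact (h.2.2.2.2 p hp).2.1 hwp.isInfix

-- scanning a nonempty suffix a of w followed by the digit d emits exactly d
theorem scan_wd {w : List Char} {d : Char} {ws : List (List Char × Char)}
    (h : StepOk w d ws) :
    ∀ (a z : List Char), a <:+ w → a ≠ [] → scanB ws (a ++ d :: z) = d :: scanB ws z := by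
  intro a
  induction a with
  | nil => intro z _ hne; exact absurd rfl hne
  | cons c a' iha =>
    intro z hsfx _
    rw [List.cons_append, scanB_cons]
    have hc : PySem.Chars.isdigit c = false := h.2.1 c (hsfx.subset List.mem_cons_self)
    rw [if_neg (by simp [hc])]
    have hemit : emit ws (c :: (a' ++ d :: z)) = [] := by
      have := emit_mid_empty h hsfx z
      rwa [List.cons_append] at this
    rw [hemit, List.nil_append]
    cases a' with
    | nil =>
      rw [List.nil_append, scanB_cons]
      simp [h.2.2.1]
    | cons b a'' =>
      exact iha z ((List.suffix_cons c (b :: a'')).trans hsfx) (by simp)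

-- one-step peeling of the first character of w ++ z
theorem scan_peel {w : List Char} {d : Char} {ws : List (List Char × Char)}
    (h : StepOk w d ws) (z : List Char) :
    scanB ws (w ++ z) = scanB ws (w.drop 1 ++ z) := by
  cases w with
  | nil => exact absurd rfl h.1
  | cons w0 wt =>
    rw [List.cons_append, scanB_cons]
    have hc : PySem.Chars.isdigit w0 = false := h.2.1 w0 List.mem_cons_self
    rw [if_neg (by simp [hc])]
    have hemit : emit ws (w0 :: (wt ++ z)) = [] := by
      have := emit_w_empty h z
      rwa [List.cons_append] at this
    rw [hemit]
    simp

theorem scan_peel' {w : List Char} {d : Char} {ws : List (List Char × Char)}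
    (h : StepOk w d ws) (z : List Char) :
    scanB ((w, d) :: ws) (w ++ z) = d :: scanB ((w, d) :: ws) (w.drop 1 ++ z) := by
  cases w with
  | nil => exact absurd rfl h.1
  | cons w0 wt =>
    rw [List.cons_append, scanB_cons]
    have hc : PySem.Chars.isdigit w0 = false := h.2.1 w0 List.mem_cons_self
    rw [if_neg (by simp [hc])]
    rw [emit_cons]
    rw [if_pos (by rw [← List.cons_append]; exact List.prefix_append _ z)]
    have hemit : emit ws (w0 :: (wt ++ z)) = [] := by
      have := emit_w_empty h z
      rwa [List.cons_append] at this
    rw [hemit]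
    simp

-- the main induction: scanning the replaced tail behind a proper suffix of w
theorem step_aux {w : List Char} {d : Char} {ws : List (List Char × Char)} (h : StepOk w d ws) :
    ∀ (n : ℕ) (a x : List Char), a.length + x.length ≤ n → a <:+ w → a ≠ w →
      scanB ws (a ++ rep w (w ++ d :: w) x) = scanB ((w, d) :: ws) (a ++ x) := by
  intro n
  induction n with
  | zero =>
    intro a x hn _ _
    have ha : a = [] := by
      cases a with
      | nil => rfl
      | cons _ _ => simp at hn
    have hx : x = [] := by
      cases x with
      | nil => rfl
      | cons _ _ => simp at hn
    subst ha; subst hx; simp [rep, scanB]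
  | succ n ih =>
    intro a x hn hsfx hanw
    cases a with
    | nil =>
      cases x with
      | nil => simp [rep, scanB]
      | cons c t =>
        by_cases hpre : w <+: c :: t
        · obtain ⟨r, hr⟩ := hpre
          have hw1 : 1 ≤ w.length := by
            cases hw : w with
            | nil => exact absurd hw h.1
            | cons _ _ => simp
          have hxr : t.drop (w.length - 1) = r := by
            have h1 : (c :: t).drop w.length = r := by rw [← hr, List.drop_left]
            obtain ⟨m, hm⟩ : ∃ m, w.length = m + 1 := ⟨w.length - 1, by omega⟩
            rw [hm] at h1 ⊢
            simpa using h1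
          have hrep : rep w (w ++ d :: w) (c :: t)
              = w ++ (d :: (w ++ rep w (w ++ d :: w) r)) := by
            simp only [rep]; rw [if_pos ⟨r, hr⟩, hxr]; simp [List.append_assoc]
          rw [List.nil_append, List.nil_append, hrep,
              scan_wd h w _ (List.suffix_refl w) h.1, ← hr,
              scan_peel h _, scan_peel' h _]
          have hlen : w.length + r.length = t.length + 1 := by
            have := congrArg List.length hr; simpa using this
          congr 1
          apply ih (w.drop 1) r ?_ ((List.drop_suffix 1 w).trans (List.suffix_refl w))
          · intro hEq
            have := congrArg List.length hEq
            simp at this; omega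
          · simp only [List.length_drop]
            simp at hn; omega
        · have hrep : rep w (w ++ d :: w) (c :: t) = c :: rep w (w ++ d :: w) t := by
            simp only [rep]; rw [if_neg hpre]
          rw [List.nil_append, List.nil_append, hrep, scanB_cons, scanB_cons]
          congr 1
          · by_cases hc : PySem.Chars.isdigit c = true
            · simp [hc]
            · simp only [hc, Bool.false_eq_true, if_false]
              rw [emit_cons, if_neg hpre, List.nil_append]
              apply List.filterMap_congr
              intro p hp
              have hiff : p.1 <+: c :: rep w (w ++ d :: w) t ↔ p.1 <+: c :: t := by
                cases hp1 : p.1 with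
                | nil => simp
                | cons e u' =>
                  rw [List.cons_prefix_cons, List.cons_prefix_cons]
                  have h1 : u' <+: rep w (w ++ d :: w) t ↔ u' <+: t := by
                    apply prefix_rep_iff w d h.2.2.1 n t u' (by simp at hn; omega)
                    · intro c' hc'
                      exact (h.2.2.2.2 p hp).1 c' (by rw [hp1]; exact List.mem_cons_of_mem e hc')
                    · intro hw'
                      refine (h.2.2.2.2 p hp).2.1 (hw'.trans ?_)
                      rw [hp1]
                      exact (List.suffix_cons e u').isInfix
                  rw [h1]
              by_cases hcond : p.1 <+: c :: t
              · rw [if_pos hcond, if_pos (hiff.mpr hcond)]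
              · rw [if_neg hcond, if_neg (fun hx => hcond (hiff.mp hx))]
          · have := ih [] t (by simp at hn ⊢; omega) (List.nil_suffix) (fun hEq => h.1 hEq.symm)
            simpa using this
    | cons a0 a' =>
      have ha0w : a0 ∈ w := hsfx.subset List.mem_cons_self
      have haltw : (a0 :: a').length < w.length := by
        rcases lt_or_eq_of_le hsfx.length_le with hlt | heq
        · exact hlt
        · exact absurd (hsfx.sublist.eq_of_length heq) hanw
      rw [List.cons_append, List.cons_append, scanB_cons, scanB_cons]
      congr 1
      · have hc : PySem.Chars.isdigit a0 = false := h.2.1 a0 ha0w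
        simp only [hc, Bool.false_eq_true, if_false]
        rw [← List.cons_append, ← List.cons_append, emit_cons]
        have hnw : ¬ w <+: (a0 :: a') ++ x := by
          intro hw
          rcases List.prefix_or_prefix_of_prefix hw (List.prefix_append (a0 :: a') x) with h1 | h1
          · have := h1.length_le; simp at this haltw; omega
          · rcases h.2.2.2.1 (a0 :: a') ((List.mem_tails _ _).mpr hsfx) h1 with h2 | h2
            · simp at h2
            · exact hanw h2
        rw [if_neg hnw, List.nil_append]
        apply List.filterMap_congr
        intro p hp
        have hiff : p.1 <+: (a0 :: a') ++ rep w (w ++ d :: w) x ↔ p.1 <+: (a0 :: a') ++ x := by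
          by_cases hl : p.1.length ≤ (a0 :: a').length
          · rw [prefix_append_of_le _ hl, prefix_append_of_le _ hl]
          · push_neg at hl
            rw [prefix_append_of_gt _ hl, prefix_append_of_gt _ hl]
            have h1 : p.1.drop (a0 :: a').length <+: rep w (w ++ d :: w) x
                ↔ p.1.drop (a0 :: a').length <+: x := by
              apply prefix_rep_iff w d h.2.2.1 x.length x _ le_rfl
              · intro c' hc'
                exact (h.2.2.2.2 p hp).1 c' ((List.drop_suffix _ _).subset hc')
              · intro hw'
                exact (h.2.2.2.2 p hp).2.1 (hw'.trans (List.drop_suffix _ _).isInfix)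
            rw [h1]
        by_cases hcond : p.1 <+: (a0 :: a') ++ x
        · rw [if_pos hcond, if_pos (hiff.mpr hcond)]
        · rw [if_neg hcond, if_neg (fun hx => hcond (hiff.mp hx))]
      · apply ih a' x (by simp at hn ⊢; omega) ((List.suffix_cons a0 a').trans hsfx)
        intro hEq
        have := congrArg List.length hEq
        simp at this haltw; omega

theorem step (w : List Char) (d : Char) (ws : List (List Char × Char)) (h : StepOk w d ws)
    (x : List Char) :
    scanB ws (rep w (w ++ d :: w) x) = scanB ((w, d) :: ws) x := by
  have := step_aux h x.length [] x (by simp) (List.nil_suffix) (fun hEq => h.1 hEq.symm)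
  simpa using this

-- the composed replacement chain of A, on characters
def repChain (cs : List Char) : List Char :=
  rep "nine".toList ("nine".toList ++ '9' :: "nine".toList)
    (rep "eight".toList ("eight".toList ++ '8' :: "eight".toList)
      (rep "seven".toList ("seven".toList ++ '7' :: "seven".toList)
        (rep "six".toList ("six".toList ++ '6' :: "six".toList)
          (rep "five".toList ("five".toList ++ '5' :: "five".toList)
            (rep "four".toList ("four".toList ++ '4' :: "four".toList)
              (rep "three".toList ("three".toList ++ '3' :: "three".toList)
                (rep "two".toList ("two".toList ++ '2' :: "two".toList)
                  (rep "one".toList ("one".toList ++ '1' :: "one".toList) cs))))))))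

theorem foldl_replace_toList (line : String) :
    (numsSpelledOut.foldl (fun l kv => PySem.Str.replace l kv.1 kv.2) line).toList
      = repChain line.toList := by
  have h1 : ("one1one".toList : List Char) = "one".toList ++ '1' :: "one".toList := by decide
  have h2 : ("two2two".toList : List Char) = "two".toList ++ '2' :: "two".toList := by decide
  have h3 : ("three3three".toList : List Char) = "three".toList ++ '3' :: "three".toList := by decide
  have h4 : ("four4four".toList : List Char) = "four".toList ++ '4' :: "four".toList := by decide
  have h5 : ("five5five".toList : List Char) = "five".toList ++ '5' :: "five".toList := by decide
  have h6 : ("six6six".toList : List Char) = "six".toList ++ '6' :: "six".toList := by decide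
  have h7 : ("seven7seven".toList : List Char) = "seven".toList ++ '7' :: "seven".toList := by decide
  have h8 : ("eight8eight".toList : List Char) = "eight".toList ++ '8' :: "eight".toList := by decide
  have h9 : ("nine9nine".toList : List Char) = "nine".toList ++ '9' :: "nine".toList := by decide
  simp only [numsSpelledOut, List.foldl_cons, List.foldl_nil, PySem.Str.toList_replace]
  rw [replace_eq_rep _ _ _ (by decide), replace_eq_rep _ _ _ (by decide),
      replace_eq_rep _ _ _ (by decide), replace_eq_rep _ _ _ (by decide),
      replace_eq_rep _ _ _ (by decide), replace_eq_rep _ _ _ (by decide),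
      replace_eq_rep _ _ _ (by decide), replace_eq_rep _ _ _ (by decide),
      replace_eq_rep _ _ _ (by decide)]
  rw [h1, h2, h3, h4, h5, h6, h7, h8, h9]
  rfl

-- a Bool version of StepOk, so that each literal instance evaluates by rfl
def stepOkB (w : List Char) (d : Char) (ws : List (List Char × Char)) : Bool :=
  !w.isEmpty && w.all (fun c => !PySem.Chars.isdigit c) && PySem.Chars.isdigit d &&
  w.tails.all (fun a => !(a.isPrefixOf w) || a.isEmpty || a == w) &&
  ws.all (fun p => p.1.all (fun c => !PySem.Chars.isdigit c)
      && !(PySem.Chars.isIn w p.1) && !(PySem.Chars.isIn p.1 w))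

theorem stepOkB_sound (w : List Char) (d : Char) (ws : List (List Char × Char))
    (h : stepOkB w d ws = true) : StepOk w d ws := by
  simp only [stepOkB, Bool.and_eq_true, List.all_eq_true, Bool.not_eq_true'] at h
  obtain ⟨⟨⟨⟨h1, h2⟩, h3⟩, h4⟩, h5⟩ := h
  refine ⟨?_, ?_, h3, ?_, ?_⟩
  · intro hw; rw [hw] at h1; simp at h1
  · intro c hc; exact h2 c hc
  · intro a ha hpre
    by_cases ha0 : a = []
    · exact Or.inl ha0
    by_cases haw : a = w
    · exact Or.inr haw
    exfalso
    have hh := h4 a ha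
    simp [List.isEmpty_iff, ha0, haw] at hh
    rw [List.isPrefixOf_iff_prefix.mpr hpre] at hh
    simp at hh
  · intro p hp
    have hh := h5 p hp
    exact ⟨fun c hc => hh.1.1 c hc,
      (PySem.Chars.isIn_eq_false_iff _ _).mp hh.1.2,
      (PySem.Chars.isIn_eq_false_iff _ _).mp hh.2⟩

set_option maxRecDepth 4000 in
theorem chain_scan (cs : List Char) :
    (repChain cs).filter PySem.Chars.isdigit = scanB wordDigits cs := by
  unfold repChain
  rw [← scanB_nil_filter,
      step _ _ _ (stepOkB_sound _ _ _ rfl), step _ _ _ (stepOkB_sound _ _ _ rfl),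
      step _ _ _ (stepOkB_sound _ _ _ rfl), step _ _ _ (stepOkB_sound _ _ _ rfl),
      step _ _ _ (stepOkB_sound _ _ _ rfl), step _ _ _ (stepOkB_sound _ _ _ rfl),
      step _ _ _ (stepOkB_sound _ _ _ rfl), step _ _ _ (stepOkB_sound _ _ _ rfl),
      step _ _ _ (stepOkB_sound _ _ _ rfl)]
  rfl

-- ===== the A-side pipeline collapses to a filter =====

theorem foldl_insertBy_eq {α : Type} (before : α → α → Bool) :
    ∀ (l acc : List α), (∀ x ∈ l, ∀ y ∈ acc, before x y = false) →
      l.Pairwise (fun a b => before b a = false) →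
      l.foldl (fun acc x => PySem.List.insertBy before x acc) acc = acc ++ l := by
  intro l
  induction l with
  | nil => intro acc _ _; simp
  | cons x l' ih =>
    intro acc hacc hpw
    rw [List.foldl_cons, PySem.List.insertBy_of_forall_not_before before x acc
      (fun y hy => hacc x List.mem_cons_self y hy)]
    rw [ih (acc ++ [x]) ?_ hpw.of_cons]
    · simp
    · intro z hz y hy
      rcases List.mem_append.mp hy with hy1 | hy1
      · exact hacc z (List.mem_cons_of_mem x hz) y hy1
      · have hyx : y = x := by simpa using hy1
        subst hyx
        exact (List.pairwise_cons.mp hpw).1 z hz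

theorem sorted2_eq_self {l : List (Int × String)} (h : l.Pairwise fun a b => a.1 < b.1) :
    PySem.List.sorted2 l (fun p => p.1) (fun p => p.2) false = l := by
  unfold PySem.List.sorted2
  rw [foldl_insertBy_eq _ l [] (by simp) ?_]
  · simp
  · apply h.imp
    intro a b hab
    have h1 : ¬ ((b, a).1.1 < (b, a).2.1) := lt_asymm hab
    simp only [if_neg (by simp : ¬ (false = true))]
    simp [h1, hab]

theorem values_ofList (l : List (Int × String)) (h : (l.map (fun p => p.1)).Nodup) :
    (PySem.Dict.ofList l).values = l.map (fun p => p.2) := by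
  unfold PySem.Dict.ofList PySem.Dict.update
  have hit := PySem.Dict.items_foldl_insert_fresh l (fun p => p.1) (fun p => p.2)
    (PySem.Dict.empty : PySem.Dict Int String)
    (fun a _ => PySem.Dict.contains_empty _) h
  unfold PySem.Dict.values
  rw [hit]
  simp [PySem.Dict.empty]

theorem enum_filter_map :
    ∀ (cs : List Char) (s : Int),
      ((PySem.List.enumerate cs s).filter (fun p => PySem.Chars.isdigit p.2)).map
          (fun p => String.mk [p.2])
        = (cs.filter PySem.Chars.isdigit).map (fun c => String.mk [c]) := by
  intro cs
  induction cs with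
  | nil => intro s; simp [PySem.List.enumerate]
  | cons c t ih =>
    intro s
    rw [PySem.List.enumerate_cons, List.filter_cons, List.filter_cons]
    by_cases hc : PySem.Chars.isdigit c = true <;> simp [hc, ih]

set_option maxHeartbeats 1000000 in
theorem pipeline_eq (cs : List Char) :
    (PySem.Dict.ofList
      (PySem.List.sorted2
        ((PySem.List.enumerate cs).foldl
          (fun (d : PySem.Dict Int String) p =>
            if PySem.Chars.isdigit p.2 then d.insert p.1 (String.mk [p.2]) else d)
          PySem.Dict.empty).items
        (fun p => p.1) (fun p => p.2) false)).values
    = (cs.filter PySem.Chars.isdigit).map (fun c => String.mk [c]) := by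
  have hpwe : (PySem.List.enumerate cs).Pairwise (fun p q => p.1 < q.1) :=
    PySem.List.pairwise_lt_enumerate cs 0
  have hpwf : ((PySem.List.enumerate cs).filter (fun p => PySem.Chars.isdigit p.2)).Pairwise
      (fun p q => p.1 < q.1) := List.Pairwise.sublist List.filter_sublist hpwe
  have hitems : ((PySem.List.enumerate cs).foldl
      (fun (d : PySem.Dict Int String) p =>
        if PySem.Chars.isdigit p.2 then d.insert p.1 (String.mk [p.2]) else d)
      PySem.Dict.empty).items
      = ((PySem.List.enumerate cs).filter (fun p => PySem.Chars.isdigit p.2)).map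
          (fun p => (p.1, String.mk [p.2])) := by
    rw [← List.foldl_filter]
    have hnd : (List.map (fun p : Int × Char => p.1)
        (List.filter (fun p => PySem.Chars.isdigit p.2) (PySem.List.enumerate cs))).Nodup :=
      List.pairwise_map.mpr (hpwf.imp (fun hab => Int.ne_of_lt hab))
    have hfold := PySem.Dict.items_foldl_insert_fresh
      (List.filter (fun p => PySem.Chars.isdigit p.2) (PySem.List.enumerate cs))
      (fun p : Int × Char => p.1) (fun p : Int × Char => String.mk [p.2])
      PySem.Dict.empty (fun a _ => PySem.Dict.contains_empty _) hnd
    simpa [PySem.Dict.empty] using hfold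
  rw [hitems]
  have hpwm : ((((PySem.List.enumerate cs).filter (fun p => PySem.Chars.isdigit p.2)).map
      (fun p => (p.1, String.mk [p.2]))) : List (Int × String)).Pairwise (fun a b => a.1 < b.1) :=
    List.pairwise_map.mpr hpwf
  rw [sorted2_eq_self hpwm]
  rw [values_ofList _ ?_]
  · rw [List.map_map]
    exact enum_filter_map cs 0
  · rw [List.map_map]
    exact (List.pairwise_map.mpr (hpwf.imp (fun hab => Int.ne_of_lt hab)))

theorem num_char_eq (line : String) :
    num_char line
      = (((numsSpelledOut.foldl (fun l kv => PySem.Str.replace l kv.1 kv.2) line).toList.filter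
            PySem.Chars.isdigit).map (fun c => String.mk [c])) := by
  simp only [num_char]
  exact pipeline_eq _

theorem num_char_agree (line : String) : num_char line = num_char_alt line := by
  rw [num_char_eq, foldl_replace_toList, chain_scan]
  rfl

-- ===== VERDICT (by name: the statement is the Claim_ definition above) =====
theorem num_char_spec : Claim_equal_num_char := by
  unfold Claim_equal_num_char Spec_num_char
  intro line _
  exact num_char_agree line
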